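-- pv_equiv track=rewrite | github.com/hogan-tech/leetcode-solution | Python/2456-most-popular-video-creator.py | mostPopularCreator
-- ===== SOURCE A (Python) =====
-- from collections import defaultdict
-- from typing import List
--
-- def mostPopularCreator(creators: List[str], ids: List[str], views: List[int]) -> List[List[str]]:
--     creatorView = defaultdict(int)
--     creatorPopularId = defaultdict(list)
--     popularCreators = []
--     maxView = -float('inf')
--     for creator, id, view in zip(creators, ids, views):
--         creatorView[creator] += view
--         if creatorView[creator] > maxView:
--             maxView = max(maxView, creatorView[creator])
--         if creator in creatorPopularId:
--             if view > creatorPopularId[creator][0]: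
--                 creatorPopularId[creator] = [view, id]
--             if view == creatorPopularId[creator][0]:
--                 if id < creatorPopularId[creator][1]:
--                     creatorPopularId[creator] = [view, id]
--         else:
--             creatorPopularId[creator] = [view, id]
--     for creator, totalView in creatorView.items():
--         if totalView == maxView:
--             popularCreators.append(creator)
--
--     result = []
--     for creator in popularCreators:
--         result.append([creator, creatorPopularId[creator][1]])
--
--     return result
-- ===== SOURCE B (Python) =====
-- def mostPopularCreator(creators, ids, views):
--     # group each creator's (view, id) pairs, then summarize every group:
--     # total views, and the id of the highest-viewed video (smallest id on ties)
--     groups = {}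
--     for c, i, v in zip(creators, ids, views):
--         groups.setdefault(c, []).append((v, i))
--     if not groups:
--         return []
--     summaries = [(c, sum(v for v, _ in vids), min(vids, key=lambda p: (-p[0], p[1]))[1])
--                  for c, vids in groups.items()]
--     top = max(t for _, t, _ in summaries)
--     return [[c, b] for c, t, b in summaries if t == top]
-- ===== Notes on version B (the rewrite author's own statement) =====
-- stated objective: simpler
-- what changed: A streams one interleaved pass updating two dicts plus a global running peak of per-creator totals; B buckets each creator's (view, id) pairs into one dict, then summarizes each bucket (sum of views, min by (-view, id)) and selects the creators whose total equals the maximum. Pre_ excludes inputs where a creator appears on several zipped rows and some zipped view is negative: negative view counts are outside the problem's domain, and there A's running-peak record can exceed every final total (A can return []), an artefact of its implementation.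
-- outside the precondition, e.g. on mostPopularCreator(['a', 'a'], ['x', 'y'], [1, -1]): A returns [], B returns [['a', 'x']]
import Mathlib
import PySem

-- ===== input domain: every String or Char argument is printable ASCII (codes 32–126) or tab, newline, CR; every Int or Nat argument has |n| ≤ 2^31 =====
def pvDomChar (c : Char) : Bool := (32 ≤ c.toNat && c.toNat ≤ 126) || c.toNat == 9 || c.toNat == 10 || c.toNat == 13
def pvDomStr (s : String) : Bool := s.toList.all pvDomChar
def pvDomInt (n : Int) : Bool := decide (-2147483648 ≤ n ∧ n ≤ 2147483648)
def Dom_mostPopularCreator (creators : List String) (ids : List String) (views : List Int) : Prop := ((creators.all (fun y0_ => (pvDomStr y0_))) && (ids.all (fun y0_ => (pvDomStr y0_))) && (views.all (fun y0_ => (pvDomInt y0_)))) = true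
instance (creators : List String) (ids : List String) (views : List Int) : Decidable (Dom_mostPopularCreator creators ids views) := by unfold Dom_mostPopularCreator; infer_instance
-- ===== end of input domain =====

-- B replaces A's interleaved three-accumulator streaming pass by a group-then-reduce
-- decomposition (bucket each creator's videos once, then summarize each bucket);
-- objective: simpler structure, same asymptotic cost.


-- ===== PORT A =====
-- Python's `-float('inf')` initial maxView is ported as `none : Option Int` (every int
-- compares greater than it, and `totalView == maxView` is false while it is -inf);
-- `creatorPopularId[creator]`'s two-element list [view, id] is ported as the pair
-- (Int × String); its reads are guarded by `creator in creatorPopularId`, so `getD`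
-- with a junk default is exact.
def pvStepA (st : PySem.Dict String Int × PySem.Dict String (Int × String) × Option Int)
    (x : String × String × Int) :
    PySem.Dict String Int × PySem.Dict String (Int × String) × Option Int :=
  let c := x.1
  let i := x.2.1
  let v := x.2.2
  let dv := st.1.modify c 0 (· + v)
  let cv := dv.getD c 0
  let mv :=
    match st.2.2 with
    | none => some cv
    | some m => if m < cv then some (max m cv) else some m
  let dp := st.2.1
  let dp' :=
    if dp.contains c then
      let dp1 := if (dp.getD c (0, "")).1 < v then dp.insert c (v, i) else dp
      if v = (dp1.getD c (0, "")).1 then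
        if i < (dp1.getD c (0, "")).2 then dp1.insert c (v, i) else dp1
      else dp1
    else dp.insert c (v, i)
  (dv, dp', mv)

def mostPopularCreator (creators : List String) (ids : List String) (views : List Int) : List (List String) :=
  let st := (creators.zip (ids.zip views)).foldl pvStepA (PySem.Dict.empty, PySem.Dict.empty, none)
  let popularCreators := st.1.items.foldl (fun acc p => if some p.2 = st.2.2 then acc ++ [p.1] else acc) []
  popularCreators.foldl (fun acc c => acc ++ [[c, (st.2.1.getD c (0, "")).2]]) []

-- ===== PORT B =====
-- Python constructs PySem does not cover are ported by hand, step for step: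
-- `sum(v for v, _ in vids)` as List.sum over the mapped views,
-- `min(vids, key=lambda p: (-p[0], p[1]))` as a first-wins fold with the tuple's
-- lexicographic comparison written out, and `max(t for _, t, _ in summaries)` as a
-- max fold over the list (all exact); the `.getD` defaults are unreachable
-- because the callers pass nonempty lists.
def pvSummarize (vids : List (Int × String)) : Int × String :=
  ((vids.map (fun q => q.1)).sum,
   ((vids.foldl
      (fun (acc : Option (Int × String)) q =>
        match acc with
        | none => some q
        | some m => if -q.1 < -m.1 ∨ (-q.1 = -m.1 ∧ q.2 < m.2) then some q else some m)
      none).getD (0, "")).2)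

def mostPopularCreator_alt (creators : List String) (ids : List String) (views : List Int) : List (List String) :=
  let groups := (creators.zip (ids.zip views)).foldl
    (fun d (x : String × String × Int) => d.modify x.1 [] (· ++ [(x.2.2, x.2.1)])) PySem.Dict.empty
  if groups.items = [] then []
  else
    let summaries := groups.items.foldl
      (fun acc p => acc ++ [(p.1, pvSummarize p.2)]) ([] : List (String × Int × String))
    let top := (summaries.foldl
      (fun (acc : Option Int) s =>
        match acc with
        | none => some s.2.1
        | some m => if m < s.2.1 then some s.2.1 else some m)
      none).getD 0
    summaries.foldl (fun acc s => if s.2.1 = top then acc ++ [[s.1, s.2.2]] else acc) []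

-- ===== PRECONDITION & SPEC =====
def pvAllNonneg (zs : List (String × String × Int)) : Bool :=
  zs.all (fun p => decide (0 ≤ p.2.2))

def pvDistinct : List String → Bool
  | [] => true
  | x :: xs => !(xs.contains x) && pvDistinct xs

-- Pre_ excludes inputs where some creator appears on several zipped rows AND some zipped
-- view is negative: a negative view count is outside the problem's domain (views are
-- counts), and there A's result follows its global running-peak record, which can exceed
-- every final total, an artefact of its implementation (A can return []).
def Pre_mostPopularCreator (creators : List String) (ids : List String) (views : List Int) : Prop :=
  (pvAllNonneg (creators.zip (ids.zip views))
    || pvDistinct ((creators.zip (ids.zip views)).map (fun p => p.1))) = true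
instance (creators : List String) (ids : List String) (views : List Int) : Decidable (Pre_mostPopularCreator creators ids views) := by unfold Pre_mostPopularCreator; infer_instance

def pvWitness_mostPopularCreator : List String × List String × List Int :=
  (["a", "b", "a"], ["x", "y", "z"], [3, 2, 1])

def Spec_mostPopularCreator (creators : List String) (ids : List String) (views : List Int) (out : List (List String)) : Prop := out = mostPopularCreator_alt creators ids views
instance (creators : List String) (ids : List String) (views : List Int) (out : List (List String)) : Decidable (Spec_mostPopularCreator creators ids views out) := by unfold Spec_mostPopularCreator; infer_instance

-- ===== CLAIM (what is proved, stated in full; the proofs are below) =====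
def Claim_equal_mostPopularCreator : Prop := ∀ (creators : List String) (ids : List String) (views : List Int), Dom_mostPopularCreator creators ids views → Pre_mostPopularCreator creators ids views → Spec_mostPopularCreator creators ids views (mostPopularCreator creators ids views)

-- ===== LEMMAS AND PROOFS =====
-- Both ports are related to a canonical per-creator association list: `pvStepC` folds the
-- zipped input into entries (creator, (total, peak, bestView, bestId)) in first-appearance
-- order.  `pvFoldA` shows A's two dicts and running maximum are projections of that list,
-- `pvFoldG`/`pvFoldC_msum`/`pvSummarize_eq` show B's buckets summarize to the same list,
-- and under Pre_ every entry's peak equals its total, so the two selections agree.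
def pvUpd (e : Int × Int × Int × String) (i : String) (v : Int) : Int × Int × Int × String :=
  let t := e.1 + v
  let p := max e.2.1 t
  if e.2.2.1 < v then (t, p, v, i)
  else if v = e.2.2.1 ∧ i < e.2.2.2 then (t, p, v, i)
  else (t, p, e.2.2.1, e.2.2.2)

def pvStepC (L : List (String × Int × Int × Int × String)) (x : String × String × Int) :
    List (String × Int × Int × Int × String) :=
  if L.any (fun e => e.1 == x.1) then
    L.map (fun e => if e.1 == x.1 then (x.1, pvUpd e.2 x.2.1 x.2.2) else e)
  else L ++ [(x.1, x.2.2, x.2.2, x.2.2, x.2.1)]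

def pvOm (m : Option Int) (x : Int) : Option Int :=
  some (match m with | none => x | some a => max a x)

def pvMaxP (L : List (String × Int × Int × Int × String)) : Option Int :=
  (L.map (fun e => e.2.2.1)).foldl pvOm none

def pvTotMax (L : List (String × Int × Int × Int × String)) : Option Int :=
  (L.map (fun e => e.2.1)).foldl pvOm none

def pvMapT (L : List (String × Int × Int × Int × String)) : List (String × Int) :=
  L.map (fun e => (e.1, e.2.1))

def pvMapB (L : List (String × Int × Int × Int × String)) : List (String × (Int × String)) :=
  L.map (fun e => (e.1, e.2.2.2))

lemma pvUpd_fst (e : Int × Int × Int × String) (i : String) (v : Int) :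
    (pvUpd e i v).1 = e.1 + v := by
  unfold pvUpd; dsimp only; split_ifs <;> rfl

lemma pvUpd_peak (e : Int × Int × Int × String) (i : String) (v : Int) :
    (pvUpd e i v).2.1 = max e.2.1 (e.1 + v) := by
  unfold pvUpd; dsimp only; split_ifs <;> rfl

lemma pvUpd_best (e : Int × Int × Int × String) (i : String) (v : Int) :
    (pvUpd e i v).2.2 =
      if e.2.2.1 < v then (v, i)
      else if v = e.2.2.1 ∧ i < e.2.2.2 then (v, i)
      else (e.2.2.1, e.2.2.2) := by
  unfold pvUpd; dsimp only; split_ifs <;> rfl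

lemma pvOm_om (m : Option Int) (x y : Int) : pvOm (pvOm m x) y = pvOm (pvOm m y) x := by
  cases m <;> simp [pvOm] <;> omega

lemma pvOm_match (o : Option Int) (z : Int) :
    (match o with | none => some z | some m => if m < z then some (max m z) else some m) = pvOm o z := by
  cases o with
  | none => rfl
  | some m => simp only [pvOm]; split_ifs with h
              · rfl
              · simp only [Option.some.injEq]; omega

lemma foldl_pvOm_comm (l : List Int) (m : Option Int) (x : Int) :
    l.foldl pvOm (pvOm m x) = pvOm (l.foldl pvOm m) x := by
  induction l generalizing m with
  | nil => rfl
  | cons y l ih => simp only [List.foldl_cons, pvOm_om m x y, ih]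

lemma foldl_pvOm_repl (l1 l2 : List Int) (p t : Int) (m : Option Int) :
    (l1 ++ max p t :: l2).foldl pvOm m = pvOm ((l1 ++ p :: l2).foldl pvOm m) t := by
  simp only [List.foldl_append, List.foldl_cons]
  rw [show pvOm (l1.foldl pvOm m) (max p t) = pvOm (pvOm (l1.foldl pvOm m) p) t by
    cases l1.foldl pvOm m <;> simp only [pvOm, Option.some.injEq] <;> omega]
  exact foldl_pvOm_comm l2 _ t

lemma pvDecomp {β : Type} {L : List (String × β)} {c : String}
    (h : L.any (fun e => e.1 == c) = true) (hn : (L.map (fun e => e.1)).Nodup) :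
    ∃ L1 e2 L2, L = L1 ++ (c, e2) :: L2 ∧ (∀ e ∈ L1, e.1 ≠ c) ∧ (∀ e ∈ L2, e.1 ≠ c) := by
  simp only [List.any_eq_true, beq_iff_eq] at h
  obtain ⟨e, he, hec⟩ := h
  obtain ⟨L1, L2, rfl⟩ := List.append_of_mem he
  subst hec
  simp only [List.map_append, List.map_cons, List.nodup_append, List.nodup_cons] at hn
  refine ⟨L1, e.2, L2, by simp, ?_, ?_⟩
  · intro a ha hac
    exact hn.2.2 a.1 (List.mem_map_of_mem ha) e.1 (by simp) hac
  · intro a ha hac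
    exact hn.2.1.1 (hac ▸ List.mem_map_of_mem ha)

lemma pvMapRepl {β : Type} (L1 L2 : List (String × β)) (c : String) (e2 : β)
    (f : String × β → β)
    (h1 : ∀ e ∈ L1, e.1 ≠ c) (h2 : ∀ e ∈ L2, e.1 ≠ c) :
    (L1 ++ (c, e2) :: L2).map (fun e => if e.1 == c then (c, f e) else e) =
      L1 ++ (c, f (c, e2)) :: L2 := by
  simp only [List.map_append, List.map_cons, beq_self_eq_true, if_true]
  rw [List.map_congr_left (l := L1) (g := id) (fun e he => by simp [h1 e he]),
      List.map_congr_left (l := L2) (g := id) (fun e he => by simp [h2 e he])]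
  simp

lemma pvGet?_decomp {β : Type} (L1 L2 : List (String × β)) (c : String) (e2 : β)
    (h1 : ∀ e ∈ L1, e.1 ≠ c) :
    (PySem.Dict.mk (L1 ++ (c, e2) :: L2)).get? c = some e2 := by
  simp only [PySem.Dict.get?, List.find?_append]
  rw [List.find?_eq_none.mpr (fun e he => by simp [h1 e he])]
  simp

lemma pvContains_mk {β : Type} (L : List (String × β)) (c : String) :
    (PySem.Dict.mk L).contains c = L.any (fun e => e.1 == c) := rfl

lemma pvAny_mapT (L : List (String × Int × Int × Int × String)) (c : String) :
    (pvMapT L).any (fun p => p.1 == c) = L.any (fun e => e.1 == c) := by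
  simp only [pvMapT, List.any_map]; rfl

lemma pvAny_mapB (L : List (String × Int × Int × Int × String)) (c : String) :
    (pvMapB L).any (fun p => p.1 == c) = L.any (fun e => e.1 == c) := by
  simp only [pvMapB, List.any_map]; rfl

lemma pvStepA_canon (L : List (String × Int × Int × Int × String)) (x : String × String × Int)
    (hn : (L.map (fun e => e.1)).Nodup) :
    pvStepA (PySem.Dict.mk (pvMapT L), PySem.Dict.mk (pvMapB L), pvMaxP L) x =
      (PySem.Dict.mk (pvMapT (pvStepC L x)), PySem.Dict.mk (pvMapB (pvStepC L x)),
        pvMaxP (pvStepC L x)) := by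
  obtain ⟨c, i, v⟩ := x
  unfold pvStepA
  dsimp only
  by_cases h : L.any (fun e => e.1 == c) = true
  · obtain ⟨L1, e2, L2, rfl, h1, h2⟩ := pvDecomp h hn
    have hC : pvStepC (L1 ++ (c, e2) :: L2) (c, i, v) =
        L1 ++ (c, pvUpd e2 i v) :: L2 := by
      rw [pvStepC, if_pos h]
      exact pvMapRepl L1 L2 c e2 (fun e => pvUpd e.2 i v) h1 h2
    have hT1 : ∀ e ∈ pvMapT L1, e.1 ≠ c := by
      intro e he; simp only [pvMapT, List.mem_map] at he; obtain ⟨a, ha, rfl⟩ := he; exact h1 a ha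
    have hB1 : ∀ e ∈ pvMapB L1, e.1 ≠ c := by
      intro e he; simp only [pvMapB, List.mem_map] at he; obtain ⟨a, ha, rfl⟩ := he; exact h1 a ha
    have hTdec : pvMapT (L1 ++ (c, e2) :: L2) = pvMapT L1 ++ (c, e2.1) :: pvMapT L2 := by
      simp [pvMapT]
    have hBdec : pvMapB (L1 ++ (c, e2) :: L2) = pvMapB L1 ++ (c, e2.2.2) :: pvMapB L2 := by
      simp [pvMapB]
    have hTc : (PySem.Dict.mk (pvMapT (L1 ++ (c, e2) :: L2))).contains c = true := by
      rw [pvContains_mk, pvAny_mapT]; exact h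
    have hBc : (PySem.Dict.mk (pvMapB (L1 ++ (c, e2) :: L2))).contains c = true := by
      rw [pvContains_mk, pvAny_mapB]; exact h
    have hTget : (PySem.Dict.mk (pvMapT (L1 ++ (c, e2) :: L2))).getD c 0 = e2.1 := by
      rw [PySem.Dict.getD_eq_get?_getD, hTdec, pvGet?_decomp _ _ _ _ hT1]; rfl
    have hBget : (PySem.Dict.mk (pvMapB (L1 ++ (c, e2) :: L2))).getD c (0, "") = e2.2.2 := by
      rw [PySem.Dict.getD_eq_get?_getD, hBdec, pvGet?_decomp _ _ _ _ hB1]; rfl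
    have hT2 : ∀ e ∈ pvMapT L2, e.1 ≠ c := by
      intro e he; simp only [pvMapT, List.mem_map] at he; obtain ⟨a, ha, rfl⟩ := he; exact h2 a ha
    have hB2 : ∀ e ∈ pvMapB L2, e.1 ≠ c := by
      intro e he; simp only [pvMapB, List.mem_map] at he; obtain ⟨a, ha, rfl⟩ := he; exact h2 a ha
    rw [hC]
    simp only [Prod.mk.injEq]
    refine ⟨?_, ?_, ?_⟩
    · apply PySem.Dict.ext
      rw [PySem.Dict.modify, hTget,
          PySem.Dict.items_insert_of_contains _ _ hTc, hTdec,
          pvMapRepl _ _ _ _ (fun _ => e2.1 + v) hT1 hT2]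
      simp [pvMapT, pvUpd_fst]
    · simp only [hBc, if_true, hBget]
      have hIns : ((PySem.Dict.mk (pvMapB (L1 ++ (c, e2) :: L2))).insert c (v, i)).items
          = pvMapB L1 ++ (c, (v, i)) :: pvMapB L2 := by
        rw [PySem.Dict.items_insert_of_contains _ _ hBc, hBdec,
            pvMapRepl _ _ _ _ (fun _ => (v, i)) hB1 hB2]
      have hRHS : pvMapB (L1 ++ (c, pvUpd e2 i v) :: L2)
          = pvMapB L1 ++ (c, (pvUpd e2 i v).2.2) :: pvMapB L2 := by simp [pvMapB]
      by_cases hlt : e2.2.2.1 < v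
      · rw [if_pos hlt, PySem.Dict.getD_insert_self]
        simp only [lt_self_iff_false, if_false, if_true]
        apply PySem.Dict.ext
        rw [hIns, hRHS, pvUpd_best, if_pos hlt]
      · rw [if_neg hlt, hBget]
        by_cases heq : v = e2.2.2.1
        · by_cases hid : i < e2.2.2.2
          · rw [if_pos heq, if_pos hid]
            apply PySem.Dict.ext
            rw [hIns, hRHS, pvUpd_best, if_neg hlt, if_pos ⟨heq, hid⟩]
          · rw [if_pos heq, if_neg hid]
            apply PySem.Dict.ext
            rw [hRHS, pvUpd_best, if_neg hlt, if_neg (by tauto), hBdec]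
        · rw [if_neg heq]
          apply PySem.Dict.ext
          rw [hRHS, pvUpd_best, if_neg hlt, if_neg (by tauto), hBdec]
    · have hcv : ((PySem.Dict.mk (pvMapT (L1 ++ (c, e2) :: L2))).modify c 0 (· + v)).getD c 0
          = e2.1 + v := by
        rw [PySem.Dict.getD_modify_self, hTget]
      rw [hcv, pvOm_match]
      unfold pvMaxP
      simp only [List.map_append, List.map_cons, pvUpd_peak]
      rw [foldl_pvOm_repl]
  · have h' : L.any (fun e => e.1 == c) = false := by
      rw [Bool.eq_false_iff]; exact h
    have hC : pvStepC L (c, i, v) = L ++ [(c, v, v, v, i)] := by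
      rw [pvStepC, if_neg h]
    have hTc : (PySem.Dict.mk (pvMapT L)).contains c = false := by
      rw [pvContains_mk, pvAny_mapT]; exact h'
    have hBc : (PySem.Dict.mk (pvMapB L)).contains c = false := by
      rw [pvContains_mk, pvAny_mapB]; exact h'
    rw [hC]
    simp only [Prod.mk.injEq]
    refine ⟨?_, ?_, ?_⟩
    · apply PySem.Dict.ext
      rw [PySem.Dict.modify, PySem.Dict.getD_of_not_contains _ _ hTc,
          PySem.Dict.items_insert_of_not_contains _ _ hTc]
      simp [pvMapT]
    · rw [if_neg (by simp [hBc])]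
      apply PySem.Dict.ext
      rw [PySem.Dict.items_insert_of_not_contains _ _ hBc]
      simp [pvMapB]
    · have hcv : ((PySem.Dict.mk (pvMapT L)).modify c 0 (· + v)).getD c 0 = 0 + v := by
        rw [PySem.Dict.getD_modify_self, PySem.Dict.getD_of_not_contains _ _ hTc]
      rw [hcv, pvOm_match]
      unfold pvMaxP
      simp only [List.map_append, List.map_cons, List.map_nil, List.foldl_append,
        List.foldl_cons, List.foldl_nil, zero_add]

lemma pvKeys_stepC_of_any (L : List (String × Int × Int × Int × String))
    (x : String × String × Int) (h : L.any (fun e => e.1 == x.1) = true) :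
    (pvStepC L x).map (fun e => e.1) = L.map (fun e => e.1) := by
  rw [pvStepC, if_pos h, List.map_map]
  apply List.map_congr_left
  intro e _
  by_cases hc : e.1 = x.1
  · simp [Function.comp, hc]
  · simp [Function.comp, hc]

lemma pvNodup_stepC (L : List (String × Int × Int × Int × String)) (x : String × String × Int)
    (hn : (L.map (fun e => e.1)).Nodup) : ((pvStepC L x).map (fun e => e.1)).Nodup := by
  by_cases h : L.any (fun e => e.1 == x.1) = true
  · rw [pvKeys_stepC_of_any L x h]; exact hn
  · rw [pvStepC, if_neg h]
    simp only [List.map_append, List.map_cons, List.map_nil]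
    rw [List.nodup_append]
    refine ⟨hn, List.nodup_singleton _, ?_⟩
    intro a ha b hb
    simp only [List.mem_singleton] at hb
    subst hb
    simp only [List.mem_map] at ha
    obtain ⟨e, he, rfl⟩ := ha
    intro hc
    exact h (List.any_eq_true.mpr ⟨e, he, by simp [hc]⟩)

lemma pvFoldA (xs : List (String × String × Int)) :
    ∀ L, (L.map (fun e => e.1)).Nodup →
    xs.foldl pvStepA (PySem.Dict.mk (pvMapT L), PySem.Dict.mk (pvMapB L), pvMaxP L) =
      (PySem.Dict.mk (pvMapT (xs.foldl pvStepC L)), PySem.Dict.mk (pvMapB (xs.foldl pvStepC L)),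
        pvMaxP (xs.foldl pvStepC L)) := by
  induction xs with
  | nil => intro L _; rfl
  | cons x xs ih =>
    intro L hn
    simp only [List.foldl_cons]
    rw [pvStepA_canon L x hn]
    exact ih (pvStepC L x) (pvNodup_stepC L x hn)

def pvStepM (M : List (String × List (Int × String))) (x : String × String × Int) :
    List (String × List (Int × String)) :=
  if M.any (fun e => e.1 == x.1) then
    M.map (fun e => if e.1 == x.1 then (x.1, e.2 ++ [(x.2.2, x.2.1)]) else e)
  else M ++ [(x.1, [(x.2.2, x.2.1)])]

lemma pvStepG_eq (M : List (String × List (Int × String))) (x : String × String × Int)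
    (hn : (M.map (fun e => e.1)).Nodup) :
    (PySem.Dict.mk M).modify x.1 [] (· ++ [(x.2.2, x.2.1)]) = PySem.Dict.mk (pvStepM M x) := by
  obtain ⟨c, i, v⟩ := x
  by_cases h : M.any (fun e => e.1 == c) = true
  · obtain ⟨L1, e2, L2, rfl, h1, h2⟩ := pvDecomp h hn
    have hc : (PySem.Dict.mk (L1 ++ (c, e2) :: L2)).contains c = true := by
      rw [pvContains_mk]; exact h
    have hget : (PySem.Dict.mk (L1 ++ (c, e2) :: L2)).getD c [] = e2 := by
      rw [PySem.Dict.getD_eq_get?_getD, pvGet?_decomp _ _ _ _ h1]; rfl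
    apply PySem.Dict.ext
    rw [PySem.Dict.modify, hget, PySem.Dict.items_insert_of_contains _ _ hc]
    show (L1 ++ (c, e2) :: L2).map _ = (pvStepM _ (c, i, v))
    rw [pvStepM, if_pos h,
        pvMapRepl L1 L2 c e2 (fun _ => e2 ++ [(v, i)]) h1 h2,
        pvMapRepl L1 L2 c e2 (fun e => e.2 ++ [(v, i)]) h1 h2]
  · have hc : (PySem.Dict.mk M).contains c = false := by
      rw [pvContains_mk, Bool.eq_false_iff]; exact h
    apply PySem.Dict.ext
    rw [PySem.Dict.modify, PySem.Dict.getD_of_not_contains _ _ hc,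
        PySem.Dict.items_insert_of_not_contains _ _ hc]
    show M ++ [(c, [] ++ [(v, i)])] = pvStepM M (c, i, v)
    rw [pvStepM, if_neg h]
    simp

lemma pvNodup_stepM (M : List (String × List (Int × String))) (x : String × String × Int)
    (hn : (M.map (fun e => e.1)).Nodup) : ((pvStepM M x).map (fun e => e.1)).Nodup := by
  by_cases h : M.any (fun e => e.1 == x.1) = true
  · rw [pvStepM, if_pos h, List.map_map]
    have : ((fun (e : String × List (Int × String)) => e.1) ∘
        (fun e => if e.1 == x.1 then (x.1, e.2 ++ [(x.2.2, x.2.1)]) else e)) = fun e => e.1 := by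
      funext e
      by_cases hc : e.1 = x.1 <;> simp [Function.comp, hc]
    rw [this]; exact hn
  · rw [pvStepM, if_neg h]
    simp only [List.map_append, List.map_cons, List.map_nil]
    rw [List.nodup_append]
    refine ⟨hn, List.nodup_singleton _, ?_⟩
    intro a ha b hb
    simp only [List.mem_singleton] at hb
    subst hb
    simp only [List.mem_map] at ha
    obtain ⟨e, he, rfl⟩ := ha
    intro hc
    exact h (List.any_eq_true.mpr ⟨e, he, by simp [hc]⟩)

lemma pvFoldG (xs : List (String × String × Int)) :
    ∀ M, (M.map (fun e => e.1)).Nodup →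
    xs.foldl (fun d (x : String × String × Int) => d.modify x.1 [] (· ++ [(x.2.2, x.2.1)]))
        (PySem.Dict.mk M) = PySem.Dict.mk (xs.foldl pvStepM M) := by
  induction xs with
  | nil => intro M _; rfl
  | cons x xs ih =>
    intro M hn
    simp only [List.foldl_cons]
    rw [pvStepG_eq M x hn]
    exact ih (pvStepM M x) (pvNodup_stepM M x hn)

def pvSum (vids : List (Int × String)) : Int × Int × Int × String :=
  match vids with
  | [] => (0, 0, 0, "")
  | q :: rest => rest.foldl (fun e q => pvUpd e q.2 q.1) (q.1, q.1, q.1, q.2)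

def pvMsum (g : String × List (Int × String)) : String × Int × Int × Int × String :=
  (g.1, pvSum g.2)

lemma pvSum_append (vids : List (Int × String)) (z : Int × String) (h : vids ≠ []) :
    pvSum (vids ++ [z]) = pvUpd (pvSum vids) z.2 z.1 := by
  obtain ⟨q, rest, rfl⟩ := List.exists_cons_of_ne_nil h
  show pvSum (q :: (rest ++ [z])) = _
  rw [pvSum, pvSum]
  simp [List.foldl_append]

lemma pvStepC_msum (M : List (String × List (Int × String))) (x : String × String × Int)
    (hne : ∀ g ∈ M, g.2 ≠ []) :
    pvStepC (M.map pvMsum) x = (pvStepM M x).map pvMsum := by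
  have hany : ((M.map pvMsum).any (fun e => e.1 == x.1)) = M.any (fun e => e.1 == x.1) := by
    rw [List.any_map]; rfl
  by_cases h : M.any (fun e => e.1 == x.1) = true
  · rw [pvStepC, if_pos (hany.trans h), pvStepM, if_pos h, List.map_map, List.map_map]
    apply List.map_congr_left
    intro g hg
    by_cases hc : g.1 = x.1
    · simp only [Function.comp, pvMsum, hc, beq_self_eq_true, if_true]
      rw [pvSum_append g.2 (x.2.2, x.2.1) (hne g hg)]
    · simp [Function.comp, pvMsum, hc]
  · rw [pvStepC, if_neg (by rw [hany]; exact h), pvStepM, if_neg h]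
    simp only [List.map_append, List.map_cons, List.map_nil]
    rfl

lemma pvNe_stepM (M : List (String × List (Int × String))) (x : String × String × Int)
    (hne : ∀ g ∈ M, g.2 ≠ []) : ∀ g ∈ pvStepM M x, g.2 ≠ [] := by
  intro g hg
  rw [pvStepM] at hg
  split_ifs at hg with h
  · simp only [List.mem_map] at hg
    obtain ⟨e, he, rfl⟩ := hg
    split_ifs with hc
    · simp
    · exact hne e he
  · rcases List.mem_append.mp hg with hg' | hg'
    · exact hne g hg'
    · simp only [List.mem_singleton] at hg'
      subst hg'
      simp

lemma pvFoldC_msum (xs : List (String × String × Int)) :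
    ∀ M, (∀ g ∈ M, g.2 ≠ []) →
    xs.foldl pvStepC (M.map pvMsum) = (xs.foldl pvStepM M).map pvMsum := by
  induction xs with
  | nil => intro M _; rfl
  | cons x xs ih =>
    intro M hne
    simp only [List.foldl_cons]
    rw [pvStepC_msum M x hne]
    exact ih (pvStepM M x) (pvNe_stepM M x hne)

lemma pvNe_foldM (xs : List (String × String × Int)) :
    ∀ M, (∀ g ∈ M, g.2 ≠ []) → ∀ g ∈ xs.foldl pvStepM M, g.2 ≠ [] := by
  induction xs with
  | nil => intro M h; exact h
  | cons x xs ih =>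
    intro M hne
    exact ih (pvStepM M x) (pvNe_stepM M x hne)

lemma pvNodup_foldC (xs : List (String × String × Int)) :
    ∀ L, (L.map (fun e => e.1)).Nodup → ((xs.foldl pvStepC L).map (fun e => e.1)).Nodup := by
  induction xs with
  | nil => intro L h; exact h
  | cons x xs ih =>
    intro L hn
    exact ih (pvStepC L x) (pvNodup_stepC L x hn)

lemma pvSum_fold_fst (l : List (Int × String)) :
    ∀ e : Int × Int × Int × String,
    (l.foldl (fun e q => pvUpd e q.2 q.1) e).1 = e.1 + (l.map (fun q => q.1)).sum := by
  induction l with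
  | nil => intro e; simp
  | cons q l ih =>
    intro e
    simp only [List.foldl_cons, List.map_cons, List.sum_cons]
    rw [ih (pvUpd e q.2 q.1), pvUpd_fst]
    ring

lemma pvMin_fold (l : List (Int × String)) :
    ∀ e : Int × Int × Int × String,
    l.foldl (fun (acc : Option (Int × String)) q =>
        match acc with
        | none => some q
        | some m => if -q.1 < -m.1 ∨ (-q.1 = -m.1 ∧ q.2 < m.2) then some q else some m)
      (some e.2.2) =
      some ((l.foldl (fun e q => pvUpd e q.2 q.1) e).2.2) := by
  induction l with
  | nil => intro e; rfl
  | cons q l ih =>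
    intro e
    simp only [List.foldl_cons]
    have hinit : (if -q.1 < -e.2.2.1 ∨ (-q.1 = -e.2.2.1 ∧ q.2 < e.2.2.2) then some q else some e.2.2)
        = some ((pvUpd e q.2 q.1).2.2) := by
      rw [pvUpd_best]
      by_cases h1 : e.2.2.1 < q.1
      · rw [if_pos (Or.inl (by omega)), if_pos h1]
      · by_cases h2 : q.1 = e.2.2.1 ∧ q.2 < e.2.2.2
        · rw [if_pos (Or.inr ⟨by omega, h2.2⟩), if_neg h1, if_pos h2]
        · rw [if_neg (by rintro (hl | ⟨hev, hid⟩)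
                         · exact h1 (by omega)
                         · exact h2 ⟨by omega, hid⟩), if_neg h1, if_neg h2]
    rw [hinit]
    exact ih (pvUpd e q.2 q.1)

lemma pvSummarize_eq (vids : List (Int × String)) (h : vids ≠ []) :
    pvSummarize vids = ((pvSum vids).1, (pvSum vids).2.2.2) := by
  obtain ⟨q, rest, rfl⟩ := List.exists_cons_of_ne_nil h
  have hsum : pvSum (q :: rest) = rest.foldl (fun e q => pvUpd e q.2 q.1) (q.1, q.1, q.1, q.2) := rfl
  unfold pvSummarize
  rw [hsum]
  simp only [List.foldl_cons, List.map_cons, List.sum_cons]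
  rw [show (some q : Option (Int × String))
        = some (((q.1, q.1, q.1, q.2) : Int × Int × Int × String).2.2) from by simp,
      pvMin_fold rest (q.1, q.1, q.1, q.2),
      pvSum_fold_fst rest (q.1, q.1, q.1, q.2)]
  rfl

def pvRender (C : List (String × Int × Int × Int × String)) : List (List String) :=
  (C.filter (fun e => decide (some e.2.1 = pvMaxP C))).map (fun e => [e.1, e.2.2.2.2])

lemma pvLookupB (C : List (String × Int × Int × Int × String))
    (hn : (C.map (fun e => e.1)).Nodup) {e : String × Int × Int × Int × String} (he : e ∈ C) :
    (PySem.Dict.mk (pvMapB C)).getD e.1 (0, "") = e.2.2.2 := by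
  apply PySem.Dict.getD_of_mem_items
  · exact List.mem_map_of_mem he
  · show ((pvMapB C).map _).Nodup
    rw [pvMapB, List.map_map]
    exact hn

lemma pvA_eq (creators ids : List String) (views : List Int) :
    mostPopularCreator creators ids views =
      pvRender ((creators.zip (ids.zip views)).foldl pvStepC []) := by
  set xs := creators.zip (ids.zip views) with hxs
  set C := xs.foldl pvStepC [] with hc
  have hn0 : (([] : List (String × Int × Int × Int × String)).map (fun e => e.1)).Nodup := by simp
  have hnC : (C.map (fun e => e.1)).Nodup := pvNodup_foldC xs [] hn0
  have hfold : xs.foldl pvStepA (PySem.Dict.empty, PySem.Dict.empty, none) =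
      (PySem.Dict.mk (pvMapT C), PySem.Dict.mk (pvMapB C), pvMaxP C) := pvFoldA xs [] hn0
  unfold mostPopularCreator
  rw [← hxs, hfold]
  dsimp only
  have h1 := PySem.List.foldl_append_ite (fun (p : String × Int) => some p.2 = pvMaxP C)
    (fun p => p.1) (pvMapT C) []
  rw [h1, PySem.List.foldl_append_singleton_eq_map]
  simp only [List.nil_append]
  rw [pvMapT, List.filter_map, List.map_map, List.map_map]
  unfold pvRender
  apply List.map_congr_left
  intro e he
  have heC : e ∈ C := (List.mem_filter.mp he).1
  simp only [Function.comp]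
  rw [pvLookupB C hnC heC]

lemma pvOm_fold_some (l : List Int) : ∀ a : Int, ∃ b, l.foldl pvOm (some a) = some b := by
  induction l with
  | nil => intro a; exact ⟨a, rfl⟩
  | cons x l ih =>
    intro a
    simp only [List.foldl_cons]
    exact ih (max a x)

lemma pvTotMax_some (C : List (String × Int × Int × Int × String)) (h : C ≠ []) :
    ∃ T, pvTotMax C = some T := by
  obtain ⟨e, rest, rfl⟩ := List.exists_cons_of_ne_nil h
  unfold pvTotMax
  simp only [List.map_cons, List.foldl_cons]
  exact pvOm_fold_some _ _

lemma pvB_eq (creators ids : List String) (views : List Int) :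
    mostPopularCreator_alt creators ids views =
      (if ((creators.zip (ids.zip views)).foldl pvStepC []) = [] then []
       else
        ((creators.zip (ids.zip views)).foldl pvStepC []).filter
            (fun e => decide (e.2.1 =
              (pvTotMax ((creators.zip (ids.zip views)).foldl pvStepC [])).getD 0))
          |>.map (fun e => [e.1, e.2.2.2.2])) := by
  set xs := creators.zip (ids.zip views) with hxs
  set C := xs.foldl pvStepC [] with hc
  set M := xs.foldl pvStepM [] with hm
  have hn0 : (([] : List (String × List (Int × String))).map (fun e => e.1)).Nodup := by simp
  have hneM : ∀ g ∈ M, g.2 ≠ [] := pvNe_foldM xs [] (by simp)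
  have hCM : C = M.map pvMsum := by
    rw [hc, hm]
    exact (pvFoldC_msum xs [] (by simp)).symm ▸ rfl
  have hg : xs.foldl (fun d (x : String × String × Int) => d.modify x.1 [] (· ++ [(x.2.2, x.2.1)]))
      PySem.Dict.empty = PySem.Dict.mk M := pvFoldG xs [] hn0
  unfold mostPopularCreator_alt
  rw [← hxs, hg]
  dsimp only
  by_cases hM : M = []
  · have hCnil : C = [] := by rw [hCM, hM]; rfl
    rw [if_pos hM, if_pos hCnil]
  · have hCne : C ≠ [] := by
      rw [hCM]
      simpa using hM
    rw [if_neg hM, if_neg hCne]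
    have hsm : List.foldl (fun acc p => acc ++ [(p.1, pvSummarize p.2)]) [] M
        = C.map (fun e => (e.1, e.2.1, e.2.2.2.2)) := by
      rw [PySem.List.foldl_append_singleton_eq_map (fun p => (p.1, pvSummarize p.2)) M []]
      simp only [List.nil_append]
      rw [hCM, List.map_map]
      apply List.map_congr_left
      intro g hg2
      simp only [Function.comp, pvMsum]
      rw [pvSummarize_eq g.2 (hneM g hg2)]
    rw [hsm]
    obtain ⟨T, hT⟩ := pvTotMax_some C hCne
    have htop : (List.foldl (fun (acc : Option Int) (s : String × Int × String) =>
        match acc with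
        | none => some s.2.1
        | some m => if m < s.2.1 then some s.2.1 else some m) none
        (C.map (fun e => (e.1, e.2.1, e.2.2.2.2)))) = pvTotMax C := by
      rw [List.foldl_map]
      unfold pvTotMax
      rw [List.foldl_map]
      congr 1
      funext m e
      show (match m with
        | none => some e.2.1
        | some a => if a < e.2.1 then some e.2.1 else some a) = pvOm m e.2.1
      cases m with
      | none => rfl
      | some a =>
        simp only [pvOm]
        split_ifs with h
        · simp only [Option.some.injEq]; omega
        · simp only [Option.some.injEq]; omega
    rw [htop, hT]
    have h2 := PySem.List.foldl_append_ite (fun (s : String × Int × String) => s.2.1 = (some T).getD 0)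
      (fun s => [s.1, s.2.2]) (C.map (fun e => (e.1, e.2.1, e.2.2.2.2))) []
    rw [h2]
    simp only [List.nil_append, Option.getD_some]
    rw [List.filter_map, List.map_map]
    rfl

-- under Pre_: every canonical entry's running peak equals its total
lemma pvTP_nonneg (zs : List (String × String × Int)) :
    ∀ L, (∀ p ∈ zs, 0 ≤ p.2.2) → (∀ e ∈ L, e.2.1 = e.2.2.1) →
    ∀ e ∈ zs.foldl pvStepC L, e.2.1 = e.2.2.1 := by
  induction zs with
  | nil => intro L _ hL; exact hL
  | cons x rest ih =>
    intro L hz hL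
    simp only [List.foldl_cons]
    apply ih (pvStepC L x) (fun p hp => hz p (by simp [hp]))
    intro e he
    have hx : 0 ≤ x.2.2 := hz x (by simp)
    rw [pvStepC] at he
    split_ifs at he with hc
    · obtain ⟨a, ha, rfl⟩ := List.mem_map.mp he
      by_cases hk : a.1 = x.1
      · simp only [hk, beq_self_eq_true, if_true]
        have := hL a ha
        rw [pvUpd_fst, pvUpd_peak]
        omega
      · simp only [beq_iff_eq, hk, if_false]
        exact hL a ha
    · rcases List.mem_append.mp he with h' | h'
      · exact hL e h'
      · simp only [List.mem_singleton] at h'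
        subst h'
        rfl

lemma pvTP_distinct (zs : List (String × String × Int)) :
    ∀ L, pvDistinct (zs.map (fun p => p.1)) = true →
    (∀ e ∈ L, ∀ p ∈ zs, p.1 ≠ e.1) → (∀ e ∈ L, e.2.1 = e.2.2.1) →
    ∀ e ∈ zs.foldl pvStepC L, e.2.1 = e.2.2.1 := by
  induction zs with
  | nil => intro L _ _ hL; exact hL
  | cons x rest ih =>
    intro L hd hdisj hL
    simp only [List.map_cons, pvDistinct, Bool.and_eq_true, Bool.not_eq_true',
      List.contains_eq_mem, decide_eq_false_iff_not] at hd
    obtain ⟨hx, hrest⟩ := hd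
    have hany : L.any (fun e => e.1 == x.1) = false := by
      rw [Bool.eq_false_iff]
      intro habs
      obtain ⟨e, he, hek⟩ := List.any_eq_true.mp habs
      exact hdisj e he x (by simp) (Eq.symm (by simpa using hek))
    simp only [List.foldl_cons]
    rw [pvStepC, if_neg (by rw [hany]; simp)]
    apply ih (L ++ [(x.1, x.2.2, x.2.2, x.2.2, x.2.1)]) hrest
    · intro e he p hp
      rcases List.mem_append.mp he with h' | h'
      · exact hdisj e h' p (by simp [hp])
      · simp only [List.mem_singleton] at h'
        subst h'
        intro habs
        exact hx (habs ▸ List.mem_map_of_mem hp)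
    · intro e he
      rcases List.mem_append.mp he with h' | h'
      · exact hL e h'
      · simp only [List.mem_singleton] at h'
        subst h'
        rfl

lemma pvPre_tot_eq_peak (creators ids : List String) (views : List Int)
    (h : Pre_mostPopularCreator creators ids views) :
    ∀ e ∈ (creators.zip (ids.zip views)).foldl pvStepC [], e.2.1 = e.2.2.1 := by
  unfold Pre_mostPopularCreator at h
  rcases Bool.or_eq_true_iff.mp h with h' | h'
  · apply pvTP_nonneg _ []
    · intro p hp
      have := List.all_eq_true.mp h' p hp
      exact of_decide_eq_true this
    · intro e he
      simp at he
  · apply pvTP_distinct _ [] h'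
    · intro e he
      simp at he
    · intro e he
      simp at he

lemma pvMaxP_eq_totMax (C : List (String × Int × Int × Int × String))
    (h : ∀ e ∈ C, e.2.1 = e.2.2.1) : pvMaxP C = pvTotMax C := by
  unfold pvMaxP pvTotMax
  congr 1
  exact List.map_congr_left (fun e he => (h e he).symm)

-- ===== VERDICT (by name: the statement is the Claim_ definition above) =====
theorem mostPopularCreator_spec : Claim_equal_mostPopularCreator := by
  intro creators ids views _ hpre
  unfold Spec_mostPopularCreator
  rw [pvA_eq, pvB_eq]
  set C := (creators.zip (ids.zip views)).foldl pvStepC [] with hc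
  by_cases hC : C = []
  · rw [if_pos hC, hC]
    rfl
  · rw [if_neg hC]
    unfold pvRender
    obtain ⟨T, hT⟩ := pvTotMax_some C hC
    rw [pvMaxP_eq_totMax C (pvPre_tot_eq_peak creators ids views hpre), hT]
    simp only [Option.getD_some]
    apply congrArg
    apply List.filter_congr
    intro e _
    simp
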